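-- pv_equiv track=rewrite | github.com/CXJ-jzx/Graduation-Project-dataflow_processing | DS2/experiments/E3_run01_20260329_184104/meta/ds2_controller.py | _direction_consistent
-- ===== SOURCE A (Python) =====
-- from typing import Dict, List, Optional, Tuple
--
-- def _direction_consistent(window: List[int], current_p: int) -> bool:
--     directions = []
--     for p in window:
--         if p > current_p:
--             directions.append("UP")
--         elif p < current_p:
--             directions.append("DOWN")
--         else:
--             directions.append("SAME")
--
--     unique = set(directions)
--     if "UP" in unique and "DOWN" in unique:
--         return False
--     return True
-- ===== SOURCE B (Python) =====
-- def _direction_consistent(window, current_p):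
--     if not window:
--         return True
--     return min(window) >= current_p or max(window) <= current_p
-- ===== Notes on version B (the rewrite author's own statement) =====
-- stated objective: alternative
-- what changed: B drops the label list/set and the per-element direction test entirely: it characterises consistency by the window's extremal values, returning min(window) >= current_p or max(window) <= current_p (empty window is True).
import Mathlib
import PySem

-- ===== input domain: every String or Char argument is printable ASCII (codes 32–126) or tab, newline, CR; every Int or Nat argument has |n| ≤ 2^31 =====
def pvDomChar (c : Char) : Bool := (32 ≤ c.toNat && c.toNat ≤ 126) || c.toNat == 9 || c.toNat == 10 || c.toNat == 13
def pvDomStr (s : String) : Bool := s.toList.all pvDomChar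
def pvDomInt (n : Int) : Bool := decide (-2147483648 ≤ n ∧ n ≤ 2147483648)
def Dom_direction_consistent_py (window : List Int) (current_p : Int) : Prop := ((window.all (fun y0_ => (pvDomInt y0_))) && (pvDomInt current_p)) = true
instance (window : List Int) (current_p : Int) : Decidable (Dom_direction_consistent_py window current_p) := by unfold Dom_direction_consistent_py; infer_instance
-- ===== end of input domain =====

-- B replaces A's per-element label list + set membership by a comparison of the window's extremal values (objective: alternative).

-- ===== PORT A =====
-- A builds a list of direction labels, then checks "UP" and "DOWN" membership in its set.
def direction_consistent_py (window : List Int) (current_p : Int) : Bool :=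
  let directions : List String :=
    window.foldl (fun acc p =>
      if p > current_p then acc ++ ["UP"]
      else if p < current_p then acc ++ ["DOWN"]
      else acc ++ ["SAME"]) []
  let unique : PySem.Set String := PySem.Set.ofList directions
  if PySem.Set.contains unique "UP" && PySem.Set.contains unique "DOWN" then false
  else true

-- ===== PORT B =====
-- B: empty window is consistent; otherwise min(window) >= current_p or max(window) <= current_p.
-- (Python's min/max on a nonempty list are the running min/max folds.)
def direction_consistent_py_alt (window : List Int) (current_p : Int) : Bool :=
  match window with
  | [] => true
  | x :: t => decide (t.foldl min x ≥ current_p) || decide (t.foldl max x ≤ current_p)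

-- ===== PRECONDITION & SPEC =====
def Spec_direction_consistent_py (window : List Int) (current_p : Int) (out : Bool) : Prop := out = direction_consistent_py_alt window current_p
instance (window : List Int) (current_p : Int) (out : Bool) : Decidable (Spec_direction_consistent_py window current_p out) := by unfold Spec_direction_consistent_py; infer_instance

-- ===== CLAIM (what is proved, stated in full; the proofs are below) =====
def Claim_equal_direction_consistent_py : Prop := ∀ (window : List Int) (current_p : Int), Dom_direction_consistent_py window current_p → Spec_direction_consistent_py window current_p (direction_consistent_py window current_p)

-- ===== LEMMAS AND PROOFS =====

-- A's label loop is the map of the label function over the window.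
lemma dir_foldl_eq_map (window : List Int) (current_p : Int) (acc : List String) :
    window.foldl (fun acc p =>
      if p > current_p then acc ++ ["UP"]
      else if p < current_p then acc ++ ["DOWN"]
      else acc ++ ["SAME"]) acc
    = acc ++ window.map (fun p =>
        if p > current_p then "UP"
        else if p < current_p then "DOWN"
        else "SAME") := by
  induction window generalizing acc with
  | nil => simp
  | cons x xs ih =>
    simp only [List.foldl_cons, List.map_cons]
    split_ifs <;> simp [ih]

lemma mem_labels_up (window : List Int) (current_p : Int) :
    ("UP" ∈ window.map (fun p =>
        if p > current_p then "UP"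
        else if p < current_p then "DOWN"
        else "SAME"))
    ↔ ∃ p ∈ window, current_p < p := by
  simp only [List.mem_map]
  constructor
  · rintro ⟨p, hp, hlab⟩
    refine ⟨p, hp, ?_⟩
    by_contra h
    split_ifs at hlab <;> simp_all
  · rintro ⟨p, hp, h⟩
    exact ⟨p, hp, by simp [h]⟩

lemma mem_labels_down (window : List Int) (current_p : Int) :
    ("DOWN" ∈ window.map (fun p =>
        if p > current_p then "UP"
        else if p < current_p then "DOWN"
        else "SAME"))
    ↔ ∃ p ∈ window, p < current_p := by
  simp only [List.mem_map]
  constructor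
  · rintro ⟨p, hp, hlab⟩
    refine ⟨p, hp, ?_⟩
    by_contra h
    split_ifs at hlab <;> simp_all
  · rintro ⟨p, hp, h⟩
    refine ⟨p, hp, ?_⟩
    have : ¬ current_p < p := by omega
    simp [this, h]

-- the running max of x :: t exceeds c iff some element does
lemma foldl_max_gt_iff (t : List Int) (x c : Int) :
    (c < t.foldl max x) ↔ ∃ p ∈ (x :: t), c < p := by
  constructor
  · intro h
    rcases PySem.List.foldl_max_mem t x with he | he
    · exact ⟨x, List.mem_cons_self .., by rw [← he]; exact h⟩
    · exact ⟨t.foldl max x, List.mem_cons_of_mem _ he, h⟩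
  · rintro ⟨p, hp, hc⟩
    rcases List.mem_cons.mp hp with rfl | hp
    · exact lt_of_lt_of_le hc (PySem.List.le_foldl_max t p).1
    · exact lt_of_lt_of_le hc ((PySem.List.le_foldl_max t x).2 p hp)

lemma foldl_min_lt_iff (t : List Int) (x c : Int) :
    (t.foldl min x < c) ↔ ∃ p ∈ (x :: t), p < c := by
  constructor
  · intro h
    rcases PySem.List.foldl_min_mem t x with he | he
    · exact ⟨x, List.mem_cons_self .., by rw [← he]; exact h⟩
    · exact ⟨t.foldl min x, List.mem_cons_of_mem _ he, h⟩
  · rintro ⟨p, hp, hc⟩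
    rcases List.mem_cons.mp hp with rfl | hp
    · exact lt_of_le_of_lt (PySem.List.foldl_min_le t p).1 hc
    · exact lt_of_le_of_lt ((PySem.List.foldl_min_le t x).2 p hp) hc

-- ===== VERDICT (by name: the statement is the Claim_ definition above) =====
theorem direction_consistent_py_spec : Claim_equal_direction_consistent_py := by
  intro window current_p _
  unfold Spec_direction_consistent_py direction_consistent_py direction_consistent_py_alt
  cases window with
  | nil => simp [PySem.Set.contains, PySem.Set.ofList]
  | cons x t =>
    simp only [dir_foldl_eq_map, List.nil_append]
    have hU : ("UP" ∈ (x :: t).map (fun p =>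
        if p > current_p then "UP" else if p < current_p then "DOWN" else "SAME"))
        ↔ current_p < t.foldl max x :=
      (mem_labels_up (x :: t) current_p).trans (foldl_max_gt_iff t x current_p).symm
    have hD : ("DOWN" ∈ (x :: t).map (fun p =>
        if p > current_p then "UP" else if p < current_p then "DOWN" else "SAME"))
        ↔ t.foldl min x < current_p :=
      (mem_labels_down (x :: t) current_p).trans (foldl_min_lt_iff t x current_p).symm
    generalize hL : (x :: t).map (fun p =>
        if p > current_p then "UP" else if p < current_p then "DOWN" else "SAME") = L at hU hD ⊢
    have cu : PySem.Set.contains (PySem.Set.ofList L) "UP"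
        = decide (current_p < t.foldl max x) := by
      by_cases h : current_p < t.foldl max x
      · have hm : "UP" ∈ PySem.Set.ofList L := (PySem.Set.mem_ofList L "UP").mpr (hU.mpr h)
        simp [PySem.Set.contains, hm, h]
      · have hm : "UP" ∉ PySem.Set.ofList L := by
          rw [PySem.Set.mem_ofList, hU]; exact h
        simp [PySem.Set.contains, hm, h]
    have cd : PySem.Set.contains (PySem.Set.ofList L) "DOWN"
        = decide (t.foldl min x < current_p) := by
      by_cases h : t.foldl min x < current_p
      · have hm : "DOWN" ∈ PySem.Set.ofList L := (PySem.Set.mem_ofList L "DOWN").mpr (hD.mpr h)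
        simp [PySem.Set.contains, hm, h]
      · have hm : "DOWN" ∉ PySem.Set.ofList L := by
          rw [PySem.Set.mem_ofList, hD]; exact h
        simp [PySem.Set.contains, hm, h]
    rw [cu, cd]
    by_cases h1 : current_p < t.foldl max x <;>
    by_cases h2 : t.foldl min x < current_p <;>
    simp [h1, h2] <;> omega
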